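-- pv_equiv track=rewrite | github.com/n-ginan/My-Problems-In-Life | Codewars/python/7th_kyu/accum.py | accum
-- ===== SOURCE A (Python) =====
-- def accum(st):
--     s = ''
--     for i in range(len(st)):
--         for j in range(-1, i):
--             if j == -1:
--                 s += st[i].upper()
--             else:
--                 s += st[i].lower()
--         if i == len(st) - 1:
--             break
--         s += '-'
--     return s
-- ===== SOURCE B (Python) =====
-- def accum(st):
--     return '-'.join(c.upper() + c.lower() * i for i, c in enumerate(st))
-- ===== Notes on version B (the rewrite author's own statement) =====
-- stated objective: faster
-- what changed: Replaces the nested per-character emission loop with dash/break bookkeeping by a single dash-join over enumerate, building each segment as the closed form upper(c) plus lower(c) repeated i times.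
import Mathlib
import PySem

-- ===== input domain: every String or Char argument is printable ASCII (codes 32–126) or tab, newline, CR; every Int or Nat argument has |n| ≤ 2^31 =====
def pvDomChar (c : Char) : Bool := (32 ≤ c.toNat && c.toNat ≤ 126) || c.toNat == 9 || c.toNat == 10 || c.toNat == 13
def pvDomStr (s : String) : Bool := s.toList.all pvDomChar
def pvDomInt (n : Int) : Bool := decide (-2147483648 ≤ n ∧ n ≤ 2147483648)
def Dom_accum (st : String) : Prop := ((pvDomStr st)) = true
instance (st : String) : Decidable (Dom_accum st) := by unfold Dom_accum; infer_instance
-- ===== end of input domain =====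

-- B replaces A's nested emission loop and dash/break bookkeeping by a single join over
-- enumerate with each segment built as a closed form (idiomatic; same return value).

-- ===== PORT A =====
def accum (st : String) : String :=
  String.ofList <|
    (PySem.List.pyRange 0 (st.toList.length : Int) 1).foldl (fun s i =>
      let s := (PySem.List.pyRange (-1) i 1).foldl (fun s j =>
        if j == (-1 : Int) then s ++ [PySem.Chars.upperChar (PySem.List.pyGetD st.toList i ' ')]
        else s ++ [PySem.Chars.lowerChar (PySem.List.pyGetD st.toList i ' ')]) s
      if i == (st.toList.length : Int) - 1 then s else s ++ ['-']) []

-- ===== PORT B =====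
def accum_alt (st : String) : String :=
  PySem.Str.join "-" ((PySem.List.enumerate st.toList 0).map
    (fun p => String.ofList ([PySem.Chars.upperChar p.2] ++ PySem.List.pyRepeat [PySem.Chars.lowerChar p.2] p.1)))

-- ===== PRECONDITION & SPEC =====
def Spec_accum (st : String) (out : String) : Prop := out = accum_alt st
instance (st : String) (out : String) : Decidable (Spec_accum st out) := by unfold Spec_accum; infer_instance

-- ===== CLAIM (what is proved, stated in full; the proofs are below) =====
def Claim_equal_accum : Prop := ∀ (st : String), Dom_accum st → Spec_accum st (accum st)

-- ===== LEMMAS AND PROOFS =====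

-- the segment contributed for index i, character c
def pvSeg (i : Int) (c : Char) : List Char :=
  PySem.Chars.upperChar c :: List.replicate i.toNat (PySem.Chars.lowerChar c)

lemma pv_foldl_congr {α β : Type} (l : List β) (f g : α → β → α)
    (h : ∀ x ∈ l, ∀ acc, f acc x = g acc x) : ∀ init, l.foldl f init = l.foldl g init := by
  induction l with
  | nil => intro init; rfl
  | cons x t ih =>
    intro init
    simp only [List.foldl]
    rw [h x (by simp)]
    exact ih (fun y hy acc => h y (by simp [hy]) acc) _

lemma pv_append_only (a : Char) : ∀ (L : List Int) (s : List Char),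
    L.foldl (fun s _ => s ++ [a]) s = s ++ List.replicate L.length a := by
  intro L
  induction L with
  | nil => simp
  | cons x t ih => intro s; simp [List.foldl, ih, List.replicate_succ]

-- inner loop of A: emits upper once then lower i times
lemma pv_inner (c : Char) (i : Int) (hi : 0 ≤ i) (s : List Char) :
    (PySem.List.pyRange (-1) i 1).foldl (fun s j =>
        if j == (-1 : Int) then s ++ [PySem.Chars.upperChar c]
        else s ++ [PySem.Chars.lowerChar c]) s = s ++ pvSeg i c := by
  rw [PySem.List.pyRange_one_cons (by omega)]
  simp only [List.foldl, beq_self_eq_true, if_pos]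
  rw [pv_foldl_congr _ _ (fun s _ => s ++ [PySem.Chars.lowerChar c])
    (by intro x hx acc
        rw [PySem.List.mem_pyRange_one] at hx
        simp [show (x == (-1:Int)) = false by simp; omega])]
  rw [pv_append_only]
  simp [pvSeg, PySem.List.length_pyRange_one, List.append_assoc]

-- outer loop of A over enumerate = join of the segments
lemma pv_outer (n : Int) : ∀ (cs : List Char) (k : Int) (s : List Char),
    cs ≠ [] → 0 ≤ k → k + cs.length = n →
    (PySem.List.enumerate cs k).foldl (fun s p =>
        let s := s ++ pvSeg p.1 p.2
        if p.1 == n - 1 then s else s ++ ['-']) s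
      = s ++ PySem.Chars.join ['-'] ((PySem.List.enumerate cs k).map (fun p => pvSeg p.1 p.2)) := by
  intro cs
  induction cs with
  | nil => intro k s h; exact absurd rfl h
  | cons c t ih =>
    intro k s _ hk hn
    rw [PySem.List.enumerate_cons]
    cases t with
    | nil =>
      simp only [List.foldl, PySem.List.enumerate_nil, List.map]
      rw [PySem.Chars.join_singleton]
      have : (k == n - 1) = true := by simp_all; omega
      simp [this]
    | cons d u =>
      have hne : (k == n - 1) = false := by
        simp only [List.length_cons] at hn; simp; omega
      simp only [List.foldl, hne, Bool.false_eq_true, ite_false]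
      rw [ih (k + 1) _ (by simp) (by omega) (by simp at hn ⊢; omega)]
      rw [PySem.List.enumerate_cons]
      simp only [List.map_cons]
      rw [PySem.Chars.join_cons_cons]
      simp [List.append_assoc]

-- ===== VERDICT (by name: the statement is the Claim_ definition above) =====
theorem accum_spec : Claim_equal_accum := by
  intro st _
  unfold Spec_accum
  apply String.ext
  have hB : (accum_alt st).toList
      = PySem.Chars.join ['-'] ((PySem.List.enumerate st.toList 0).map (fun p => pvSeg p.1 p.2)) := by
    unfold accum_alt
    rw [PySem.Str.toList_join]
    simp [List.map_map, Function.comp_def, String.toList_ofList, pvSeg, PySem.List.pyRepeat_singleton]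
  rw [hB]
  unfold accum
  rw [String.toList_ofList]
  have h1 : (PySem.List.pyRange 0 (st.toList.length : Int) 1).foldl (fun s i =>
      let s := (PySem.List.pyRange (-1) i 1).foldl (fun s j =>
        if j == (-1 : Int) then s ++ [PySem.Chars.upperChar (PySem.List.pyGetD st.toList i ' ')]
        else s ++ [PySem.Chars.lowerChar (PySem.List.pyGetD st.toList i ' ')]) s
      if i == (st.toList.length : Int) - 1 then s else s ++ ['-']) []
    = (PySem.List.enumerate st.toList 0).foldl (fun s p =>
        let s := s ++ pvSeg p.1 p.2
        if p.1 == (st.toList.length : Int) - 1 then s else s ++ ['-']) [] := by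
    rw [PySem.List.enumerate_eq_map_pyRange (d := ' '), List.foldl_map]
    exact pv_foldl_congr _ _ _
      (by intro i hi acc
          rw [PySem.List.mem_pyRange_one] at hi
          simp only
          rw [pv_inner _ _ (by omega)]) []
  rw [h1]
  cases h : st.toList with
  | nil => simp [PySem.List.enumerate_nil, PySem.Chars.join_nil]
  | cons c t =>
    rw [pv_outer ((c :: t).length : Int) (c :: t) 0 [] (by simp) le_rfl (by simp)]
    simp
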